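-- pv_equiv track=rewrite | github.com/kushang19/DSA_Python | Data_Structure/Non-Linear_DS/Graphs/Medium/nearest_cell.py | nearest_cell
-- ===== SOURCE A (Python) =====
-- from collections import deque
--
-- def nearest_cell(grid):
--     rows, cols = len(grid), len(grid[0])
--
--     dist = [[-1] * cols for _ in range(rows)]
--     queue = deque()
--
--     # Step 1: Push all 1s into queue
--     for r in range(rows):
--         for c in range(cols):
--             if grid[r][c] == 1:
--                 dist[r][c] = 0
--                 queue.append((r, c))
--
--     directions = [(1,0), (-1,0), (0,1), (0,-1)]
--
--     # Step 2: Multi-source BFS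
--     while queue:
--         r, c = queue.popleft()
--
--         for dr, dc in directions:
--             nr, nc = r + dr, c + dc
--
--             if 0 <= nr < rows and 0 <= nc < cols and dist[nr][nc] == -1:
--                 dist[nr][nc] = dist[r][c] + 1
--                 queue.append((nr, nc))
--
--     return dist
-- ===== SOURCE B (Python) =====
-- def nearest_cell(grid):
--     rows, cols = len(grid), len(grid[0])
--     ones = [(r, c) for r in range(rows) for c in range(cols) if grid[r][c] == 1]
--     return [[min([abs(r - a) + abs(c - b) for a, b in ones], default=-1)
--              for c in range(cols)] for r in range(rows)]
-- ===== Notes on version B (the rewrite author's own statement) =====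
-- stated objective: alternative
-- what changed: Replaces the deque-driven multi-source BFS by a closed-form computation: collect the coordinates of all 1-cells once, then each output cell is the minimum Manhattan distance to any of them (default -1); correct because the grid has no obstacles, so BFS distance equals L1 distance.
import Mathlib
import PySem

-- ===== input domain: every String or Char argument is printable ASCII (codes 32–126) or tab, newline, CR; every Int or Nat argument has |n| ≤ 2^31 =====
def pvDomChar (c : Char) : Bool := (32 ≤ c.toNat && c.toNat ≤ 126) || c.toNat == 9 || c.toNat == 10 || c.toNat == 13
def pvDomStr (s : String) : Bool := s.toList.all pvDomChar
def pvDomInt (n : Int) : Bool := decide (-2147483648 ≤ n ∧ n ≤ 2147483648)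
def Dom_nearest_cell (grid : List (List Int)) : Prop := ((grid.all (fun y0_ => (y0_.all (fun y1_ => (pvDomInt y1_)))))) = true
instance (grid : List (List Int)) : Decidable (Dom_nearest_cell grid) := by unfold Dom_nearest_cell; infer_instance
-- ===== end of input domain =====

-- B replaces A's deque-driven multi-source BFS by a closed-form computation (each cell =
-- minimum Manhattan distance to the list of 1-cells, -1 if there are none); equivalence is
-- about the return value (A mutates only its local dist matrix, never the argument).

-- shared read/write primitives (both Pythons read grid[r][c]; A reads/writes dist[r][c])
def pvGetG (grid : List (List Int)) (r c : Nat) : Int := (grid.getD r []).getD c 0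

def pvRow (dist : List (List Int)) (r : Nat) : List Int := dist.getD r []

def pvGet2 (dist : List (List Int)) (r c : Nat) : Int := (pvRow dist r).getD c (-1)

def pvSet2 (dist : List (List Int)) (r c : Nat) (v : Int) : List (List Int) :=
  dist.set r ((pvRow dist r).set c v)

-- number of -1 cells: termination measure of A's while-loop (cited by decreasing_by)
def pvCountNeg (dist : List (List Int)) : Nat :=
  (dist.map (fun row => row.countP (fun v => v == -1))).sum

theorem pvCountP_set_row (row : List Int) (c : Nat) (v : Int) (hc : c < row.length)
    (hneg : row.getD c (-1) = -1) (hv : v ≠ -1) :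
    (row.set c v).countP (fun x => x == -1) + 1 ≤ row.countP (fun x => x == -1) := by
  induction row generalizing c with
  | nil => simp at hc
  | cons a as ih =>
    cases c with
    | zero =>
      simp only [List.getD_cons_zero] at hneg
      subst hneg
      simp [hv]
    | succ c =>
      simp only [List.getD_cons_succ] at hneg
      simp only [List.length_cons, Nat.succ_lt_succ_iff] at hc
      have := ih c hc hneg
      simp only [List.set_cons_succ, List.countP_cons]
      omega

theorem pvCountNeg_set (dist : List (List Int)) (r c : Nat) (v : Int) (hr : r < dist.length)
    (hc : c < (pvRow dist r).length) (hneg : pvGet2 dist r c = -1) (hv : v ≠ -1) :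
    pvCountNeg (pvSet2 dist r c v) + 1 ≤ pvCountNeg dist := by
  induction dist generalizing r with
  | nil => simp at hr
  | cons row rest ih =>
    cases r with
    | zero =>
      simp only [pvSet2, pvRow, List.getD_cons_zero, List.set_cons_zero] at *
      simp only [pvCountNeg, List.map_cons, List.sum_cons]
      have := pvCountP_set_row row c v hc hneg hv
      omega
    | succ r =>
      simp only [pvSet2, pvRow, List.getD_cons_succ, List.set_cons_succ] at *
      simp only [pvCountNeg, List.map_cons, List.sum_cons]
      simp only [List.length_cons, Nat.succ_lt_succ_iff] at hr
      have := ih r hr hc hneg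
      simp only [pvCountNeg] at this
      omega

-- one foldl whose every step keeps (countNeg + queue length) non-increasing does so globally
theorem pvFoldl_measure {β : Type} (f : (List (List Int) × List (Nat × Nat)) → β → (List (List Int) × List (Nat × Nat)))
    (h : ∀ st b, pvCountNeg (f st b).1 + (f st b).2.length ≤ pvCountNeg st.1 + st.2.length)
    (l : List β) (st : List (List Int) × List (Nat × Nat)) :
    pvCountNeg (l.foldl f st).1 + (l.foldl f st).2.length ≤ pvCountNeg st.1 + st.2.length := by
  induction l generalizing st with
  | nil => simp
  | cons b l ih =>
    simp only [List.foldl_cons]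
    exact le_trans (ih _) (h st b)

-- ===== PORT A =====
def pvDirsA : List (Int × Int) := [(1,0), (-1,0), (0,1), (0,-1)]

-- A's `for dr, dc in directions` body.  The length conjuncts and `0 ≤ dist[r][c]` are
-- totality guards only: at run time the written cell lies in the rows×cols dist matrix and
-- every queued cell already holds a distance ≥ 0.
def pvStepA (rows cols : Nat) (rc : Nat × Nat) (st : List (List Int) × List (Nat × Nat))
    (d : Int × Int) : List (List Int) × List (Nat × Nat) :=
  if 0 ≤ (rc.1 : Int) + d.1 ∧ (rc.1 : Int) + d.1 < (rows : Int) ∧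
      0 ≤ (rc.2 : Int) + d.2 ∧ (rc.2 : Int) + d.2 < (cols : Int) ∧
      ((rc.1 : Int) + d.1).toNat < st.1.length ∧
      ((rc.2 : Int) + d.2).toNat < (pvRow st.1 ((rc.1 : Int) + d.1).toNat).length ∧
      pvGet2 st.1 ((rc.1 : Int) + d.1).toNat ((rc.2 : Int) + d.2).toNat = -1 ∧
      0 ≤ pvGet2 st.1 rc.1 rc.2 then
    (pvSet2 st.1 ((rc.1 : Int) + d.1).toNat ((rc.2 : Int) + d.2).toNat
        (pvGet2 st.1 rc.1 rc.2 + 1),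
      st.2 ++ [(((rc.1 : Int) + d.1).toNat, ((rc.2 : Int) + d.2).toNat)])
  else st

theorem pvStepA_measure (rows cols : Nat) (rc : Nat × Nat)
    (st : List (List Int) × List (Nat × Nat)) (d : Int × Int) :
    pvCountNeg (pvStepA rows cols rc st d).1 + (pvStepA rows cols rc st d).2.length ≤
      pvCountNeg st.1 + st.2.length := by
  unfold pvStepA
  split_ifs with h
  · obtain ⟨_, _, _, _, h5, h6, h7, h8⟩ := h
    have hv : pvGet2 st.1 rc.1 rc.2 + 1 ≠ -1 := by omega
    have := pvCountNeg_set st.1 _ _ _ h5 h6 h7 hv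
    simp only [List.length_append, List.length_cons, List.length_nil]
    omega
  · exact le_rfl

def pvRelaxA (rows cols : Nat) (rc : Nat × Nat) (st : List (List Int) × List (Nat × Nat)) :
    List (List Int) × List (Nat × Nat) :=
  pvDirsA.foldl (pvStepA rows cols rc) st

-- A's BFS while-loop over the deque
def pvBfsA (rows cols : Nat) (dist : List (List Int)) (queue : List (Nat × Nat)) :
    List (List Int) :=
  match queue with
  | [] => dist
  | rc :: rest =>
    let st := pvRelaxA rows cols rc (dist, [])
    pvBfsA rows cols st.1 (rest ++ st.2)
termination_by pvCountNeg dist + queue.length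
decreasing_by
  have h := pvFoldl_measure (pvStepA rows cols rc) (pvStepA_measure rows cols rc)
    pvDirsA (dist, [])
  simp only [List.length_append, List.length_cons, List.length_nil] at h ⊢
  change pvCountNeg (pvRelaxA rows cols rc (dist, [])).1 +
    (rest.length + (pvRelaxA rows cols rc (dist, [])).2.length) < _
  unfold pvRelaxA
  omega

-- A's step-1 double loop body (push the sources)
def pvInStep (grid : List (List Int)) (r : Nat) (st : List (List Int) × List (Nat × Nat))
    (c : Nat) : List (List Int) × List (Nat × Nat) :=
  if pvGetG grid r c = 1 then (pvSet2 st.1 r c 0, st.2 ++ [(r, c)]) else st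

def nearest_cell (grid : List (List Int)) : List (List Int) :=
  let rows := grid.length
  let cols := (grid.getD 0 []).length
  let init : List (List Int) × List (Nat × Nat) :=
    (List.range rows).foldl (fun st r => (List.range cols).foldl (pvInStep grid r) st)
      ((List.range rows).map (fun _ => List.replicate cols (-1)), [])
  pvBfsA rows cols init.1 init.2

-- ===== PORT B =====
-- min(list, default=d) of Python (ints): first minimum of a nonempty list, else the default
def pvMinD (l : List Int) (d : Int) : Int :=
  match l with
  | [] => d
  | x :: xs => xs.foldl min x

def nearest_cell_alt (grid : List (List Int)) : List (List Int) :=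
  let rows := grid.length
  let cols := (grid.getD 0 []).length
  let ones := (List.range rows).flatMap (fun r =>
    ((List.range cols).filter (fun c => pvGetG grid r c = 1)).map (fun c => (r, c)))
  (List.range rows).map (fun (r : Nat) =>
    (List.range cols).map (fun (c : Nat) =>
      pvMinD (ones.map (fun p => |(r : Int) - (p.1 : Int)| + |(c : Int) - (p.2 : Int)|)) (-1)))

-- ===== PRECONDITION & SPEC =====
-- Pre_ is exactly where Python A returns: grid[0] exists and every row reaches index cols-1
-- (step 1 raises IndexError on empty input or on a row shorter than row 0; B raises there too)
def Pre_nearest_cell (grid : List (List Int)) : Prop :=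
  grid ≠ [] ∧ ∀ row ∈ grid, (grid.getD 0 []).length ≤ row.length
instance (grid : List (List Int)) : Decidable (Pre_nearest_cell grid) := by
  unfold Pre_nearest_cell; infer_instance

def pvWitness_nearest_cell : List (List Int) := [[1, 0, 0], [0, 0, 1]]

def Spec_nearest_cell (grid : List (List Int)) (out : List (List Int)) : Prop :=
  out = nearest_cell_alt grid
instance (grid : List (List Int)) (out : List (List Int)) :
    Decidable (Spec_nearest_cell grid out) := by unfold Spec_nearest_cell; infer_instance

-- ===== CLAIM (what is proved, stated in full; the proofs are below) =====
def Claim_equal_nearest_cell : Prop := ∀ (grid : List (List Int)), Dom_nearest_cell grid →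
  Pre_nearest_cell grid → Spec_nearest_cell grid (nearest_cell grid)

-- ===== LEMMAS AND PROOFS =====

-- 4-adjacency of grid cells (Nat coordinates)
def pvAdj (p q : Nat × Nat) : Prop :=
  (p.1 = q.1 ∧ (p.2 = q.2 + 1 ∨ q.2 = p.2 + 1)) ∨ (p.2 = q.2 ∧ (p.1 = q.1 + 1 ∨ q.1 = p.1 + 1))

theorem pvAdj_symm {p q : Nat × Nat} (h : pvAdj p q) : pvAdj q p := by
  unfold pvAdj at *; tauto

-- the L1 nearest-source value both programs compute
def pvD (ones : List (Nat × Nat)) (p : Nat × Nat) : Int :=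
  pvMinD (ones.map (fun q => |(p.1 : Int) - q.1| + |(p.2 : Int) - q.2|)) (-1)

theorem pvFoldl_min_le_init (xs : List Int) (a : Int) : xs.foldl min a ≤ a := by
  induction xs generalizing a with
  | nil => simp
  | cons b xs ih =>
    simp only [List.foldl_cons]
    exact le_trans (ih _) (min_le_left _ _)

theorem pvFoldl_min_le (xs : List Int) (a x : Int) (h : x ∈ a :: xs) :
    xs.foldl min a ≤ x := by
  induction xs generalizing a with
  | nil => simp at h; simp [h]
  | cons b xs ih =>
    simp only [List.foldl_cons]
    rcases List.mem_cons.mp h with rfl | h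
    · exact le_trans (pvFoldl_min_le_init _ _) (min_le_left _ _)
    · rcases List.mem_cons.mp h with rfl | h
      · exact le_trans (pvFoldl_min_le_init _ _) (min_le_right _ _)
      · exact ih _ (List.mem_cons_of_mem _ h)

theorem pvFoldl_min_mem (xs : List Int) (a : Int) : xs.foldl min a ∈ a :: xs := by
  induction xs generalizing a with
  | nil => simp
  | cons b xs ih =>
    simp only [List.foldl_cons]
    rcases List.mem_cons.mp (ih (min a b)) with h | h
    · rcases min_choice a b with hc | hc <;> rw [h, hc] <;> simp
    · simp [h]

theorem pvMinD_le (l : List Int) (d x : Int) (h : x ∈ l) : pvMinD l d ≤ x := by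
  cases l with
  | nil => simp at h
  | cons a xs => exact pvFoldl_min_le xs a x h

theorem pvMinD_mem (l : List Int) (d : Int) (h : l ≠ []) : pvMinD l d ∈ l := by
  cases l with
  | nil => simp at h
  | cons a xs => exact pvFoldl_min_mem xs a

theorem pvD_le (ones : List (Nat × Nat)) (p q : Nat × Nat) (h : q ∈ ones) :
    pvD ones p ≤ |(p.1 : Int) - q.1| + |(p.2 : Int) - q.2| :=
  pvMinD_le _ _ _ (List.mem_map.mpr ⟨q, h, rfl⟩)

theorem pvD_exists (ones : List (Nat × Nat)) (p : Nat × Nat) (h : ones ≠ []) :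
    ∃ q ∈ ones, pvD ones p = |(p.1 : Int) - q.1| + |(p.2 : Int) - q.2| := by
  have := pvMinD_mem (ones.map (fun q => |(p.1 : Int) - q.1| + |(p.2 : Int) - q.2|)) (-1)
    (by simpa using h)
  obtain ⟨q, hq, hval⟩ := List.mem_map.mp this
  exact ⟨q, hq, hval.symm⟩

theorem pvD_nonneg (ones : List (Nat × Nat)) (p : Nat × Nat) (h : ones ≠ []) :
    0 ≤ pvD ones p := by
  obtain ⟨q, _, hval⟩ := pvD_exists ones p h
  rw [hval]
  positivity

theorem pvD_lipschitz (ones : List (Nat × Nat)) (p q : Nat × Nat) (h : ones ≠ [])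
    (hadj : pvAdj p q) : pvD ones p ≤ pvD ones q + 1 := by
  obtain ⟨t, ht, hval⟩ := pvD_exists ones q h
  have hle := pvD_le ones p t ht
  rw [hval]
  have : |(p.1 : Int) - t.1| + |(p.2 : Int) - t.2| ≤
      (|(q.1 : Int) - t.1| + |(q.2 : Int) - t.2|) + 1 := by
    unfold pvAdj at hadj
    simp only [Int.abs_eq_natAbs]
    rcases hadj with ⟨h1, h2 | h2⟩ | ⟨h1, h2 | h2⟩ <;> omega
  omega

theorem pvD_zero_mem (ones : List (Nat × Nat)) (p : Nat × Nat) (h : ones ≠ [])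
    (hz : pvD ones p = 0) : p ∈ ones := by
  obtain ⟨q, hq, hval⟩ := pvD_exists ones p h
  obtain ⟨q1, q2⟩ := q
  obtain ⟨p1, p2⟩ := p
  rw [hval] at hz
  simp only [Int.abs_eq_natAbs] at hz
  have h1 : p1 = q1 ∧ p2 = q2 := by omega
  rw [h1.1, h1.2]
  exact hq

theorem pvD_mem_zero (ones : List (Nat × Nat)) (p : Nat × Nat) (h : p ∈ ones) :
    pvD ones p = 0 := by
  have h1 := pvD_le ones p p h
  have h2 := pvD_nonneg ones p (by rintro rfl; simp at h)
  simp at h1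
  omega

theorem pvD_descent (rows cols : Nat) (ones : List (Nat × Nat)) (h : ones ≠ [])
    (hb : ∀ q ∈ ones, q.1 < rows ∧ q.2 < cols) (p : Nat × Nat)
    (hp1 : p.1 < rows) (hp2 : p.2 < cols) (hpos : 0 < pvD ones p) :
    ∃ w : Nat × Nat, pvAdj w p ∧ w.1 < rows ∧ w.2 < cols ∧ pvD ones w = pvD ones p - 1 := by
  obtain ⟨t, ht, hval⟩ := pvD_exists ones p h
  have htb := hb t ht
  -- choose the neighbour one step towards the minimising source
  have key : ∃ w : Nat × Nat, pvAdj w p ∧ w.1 < rows ∧ w.2 < cols ∧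
      |(w.1 : Int) - t.1| + |(w.2 : Int) - t.2| = pvD ones p - 1 := by
    obtain ⟨p1, p2⟩ := p
    obtain ⟨t1, t2⟩ := t
    simp only at hp1 hp2 htb
    rw [hval] at hpos ⊢
    rcases Nat.lt_trichotomy t1 p1 with hc | hc | hc
    · refine ⟨(p1 - 1, p2), Or.inr ⟨rfl, Or.inr (by simp; omega)⟩, by omega, hp2, ?_⟩
      simp only [Int.abs_eq_natAbs]
      omega
    · rcases Nat.lt_trichotomy t2 p2 with hd | hd | hd
      · refine ⟨(p1, p2 - 1), Or.inl ⟨rfl, Or.inr (by simp; omega)⟩, hp1, by omega, ?_⟩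
        simp only [Int.abs_eq_natAbs]
        omega
      · exfalso
        subst hc hd
        simp only [Int.abs_eq_natAbs] at hpos
        omega
      · refine ⟨(p1, p2 + 1), Or.inl ⟨rfl, Or.inl rfl⟩, hp1, by omega, ?_⟩
        simp only [Int.abs_eq_natAbs]
        omega
    · refine ⟨(p1 + 1, p2), Or.inr ⟨rfl, Or.inl rfl⟩, by omega, hp2, ?_⟩
      simp only [Int.abs_eq_natAbs]
      omega
  obtain ⟨w, hadj, hw1, hw2, hwd⟩ := key
  refine ⟨w, hadj, hw1, hw2, ?_⟩
  have hle := pvD_le ones w t ht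
  have hlip := pvD_lipschitz ones p w h (pvAdj_symm hadj)
  omega

-- matrix shape and access lemmas
def pvShape (M : List (List Int)) (rows cols : Nat) : Prop :=
  M.length = rows ∧ ∀ row ∈ M, row.length = cols

theorem pvShape_row {M : List (List Int)} {rows cols r : Nat} (h : pvShape M rows cols)
    (hr : r < rows) : (pvRow M r).length = cols := by
  obtain ⟨h1, h2⟩ := h
  rw [pvRow, List.getD_eq_getElem _ _ (by omega)]
  exact h2 _ (List.getElem_mem _)

theorem pvShape_set {M : List (List Int)} {rows cols r c : Nat} {v : Int}
    (h : pvShape M rows cols) (hr : r < rows) :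
    pvShape (pvSet2 M r c v) rows cols := by
  obtain ⟨h1, h2⟩ := h
  refine ⟨by simp [pvSet2, h1], ?_⟩
  intro row hrow
  rcases List.mem_or_eq_of_mem_set hrow with h | h
  · exact h2 _ h
  · rw [h, List.length_set]
    exact pvShape_row ⟨h1, h2⟩ hr

theorem pvRow_set_self {M : List (List Int)} {r c : Nat} {v : Int} (hrl : r < M.length) :
    pvRow (pvSet2 M r c v) r = (pvRow M r).set c v := by
  unfold pvRow pvSet2
  rw [List.getD_eq_getElem?_getD, List.getElem?_set_self hrl, Option.getD_some]
  rfl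

theorem pvRow_set_ne {M : List (List Int)} {r c r' : Nat} {v : Int} (h : r' ≠ r) :
    pvRow (pvSet2 M r c v) r' = pvRow M r' := by
  unfold pvRow pvSet2
  rw [List.getD_eq_getElem?_getD, List.getD_eq_getElem?_getD,
    List.getElem?_set_ne (fun hh => h hh.symm)]

theorem pvGet2_set_self {M : List (List Int)} {rows cols r c : Nat} {v : Int}
    (h : pvShape M rows cols) (hr : r < rows) (hc : c < cols) :
    pvGet2 (pvSet2 M r c v) r c = v := by
  have hrl : r < M.length := by rw [h.1]; exact hr
  have hcl : c < (pvRow M r).length := by rw [pvShape_row h hr]; exact hc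
  rw [pvGet2, pvRow_set_self hrl, List.getD_eq_getElem?_getD,
    List.getElem?_set_self hcl, Option.getD_some]

theorem pvGet2_set_ne {M : List (List Int)} {r c r' c' : Nat} {v : Int}
    (h : (r', c') ≠ (r, c)) :
    pvGet2 (pvSet2 M r c v) r' c' = pvGet2 M r' c' := by
  by_cases hr : r' = r
  · subst hr
    have hc : c' ≠ c := by simpa using h
    by_cases hrl : r' < M.length
    · rw [pvGet2, pvGet2, pvRow_set_self hrl, List.getD_eq_getElem?_getD,
        List.getElem?_set_ne (fun hh => hc hh.symm), ← List.getD_eq_getElem?_getD]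
    · have heq : pvSet2 M r' c v = M := by
        unfold pvSet2
        exact List.set_eq_of_length_le (by omega)
      rw [heq]
  · rw [pvGet2, pvGet2, pvRow_set_ne hr]

-- access into a (range rows).map (… range cols …) matrix
theorem pvRow_mk (rows cols : Nat) (g : Nat → Nat → Int) (r : Nat) (hr : r < rows) :
    pvRow ((List.range rows).map (fun r => (List.range cols).map (fun c => g r c))) r =
      (List.range cols).map (fun c => g r c) := by
  unfold pvRow
  rw [List.getD_eq_getElem _ _ (by simpa using hr)]
  simp

theorem pvGet2_mk (rows cols : Nat) (g : Nat → Nat → Int) (r c : Nat) (hr : r < rows)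
    (hc : c < cols) :
    pvGet2 ((List.range rows).map (fun r => (List.range cols).map (fun c => g r c))) r c =
      g r c := by
  rw [pvGet2, pvRow_mk rows cols g r hr, List.getD_eq_getElem _ _ (by simpa using hc)]
  simp

theorem pvShape_mk (rows cols : Nat) (g : Nat → Nat → Int) :
    pvShape ((List.range rows).map (fun r => (List.range cols).map (fun c => g r c)))
      rows cols := by
  constructor
  · simp
  · intro row hrow
    obtain ⟨r, _, rfl⟩ := List.mem_map.mp hrow
    simp

theorem pvMatrix_ext (M : List (List Int)) (rows cols : Nat) (g : Nat → Nat → Int)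
    (hsh : pvShape M rows cols) (hv : ∀ r c, r < rows → c < cols → pvGet2 M r c = g r c) :
    M = (List.range rows).map (fun r => (List.range cols).map (fun c => g r c)) := by
  apply List.ext_getElem
  · simp [hsh.1]
  · intro r h1 h2
    have hr : r < rows := by simpa using h2
    apply List.ext_getElem
    · simp
      rw [hsh.2 _ (List.getElem_mem _)]
    · intro c hh1 hh2
      have hc : c < cols := by simpa using hh2
      have := hv r c hr hc
      rw [pvGet2, pvRow, List.getD_eq_getElem _ _ h1,
        List.getD_eq_getElem _ _ hh1] at this
      rw [this]
      simp

-- the BFS invariant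
def pvInv (rows cols : Nat) (ones : List (Nat × Nat)) (dist : List (List Int))
    (queue : List (Nat × Nat)) : Prop :=
  pvShape dist rows cols ∧
  (∀ p ∈ ones, pvGet2 dist p.1 p.2 ≠ -1) ∧
  (∀ r c, r < rows → c < cols → pvGet2 dist r c ≠ -1 → pvGet2 dist r c = pvD ones (r, c)) ∧
  (∀ p ∈ queue, p.1 < rows ∧ p.2 < cols ∧ pvGet2 dist p.1 p.2 ≠ -1) ∧
  List.Pairwise (fun p q => pvGet2 dist p.1 p.2 ≤ pvGet2 dist q.1 q.2) queue ∧
  (∀ u ∈ queue.head?, ∀ p ∈ queue, pvGet2 dist p.1 p.2 ≤ pvGet2 dist u.1 u.2 + 1) ∧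
  (∀ r c, r < rows → c < cols → pvGet2 dist r c ≠ -1 → (r, c) ∉ queue →
    ∀ p : Nat × Nat, pvAdj p (r, c) → p.1 < rows → p.2 < cols → pvGet2 dist p.1 p.2 ≠ -1)

-- any undiscovered cell is strictly farther than the queue front
theorem pvUndisc (rows cols : Nat) (ones : List (Nat × Nat)) (hne : ones ≠ [])
    (hb : ∀ q ∈ ones, q.1 < rows ∧ q.2 < cols) (dist : List (List Int))
    (queue : List (Nat × Nat)) (hinv : pvInv rows cols ones dist queue) :
    ∀ m : Nat, ∀ r c, r < rows → c < cols → pvGet2 dist r c = -1 →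
      pvD ones (r, c) = (m : Int) →
      ∃ u rest, queue = u :: rest ∧ pvGet2 dist u.1 u.2 + 1 ≤ (m : Int) := by
  obtain ⟨hsh, hsrc, hcor, hqb, hpw, hhd, hproc⟩ := hinv
  intro m
  induction m using Nat.strong_induction_on with
  | _ m ih =>
    intro r c hr hc hund hDm
    by_cases hm0 : m = 0
    · exfalso
      subst hm0
      have hmem : (r, c) ∈ ones := pvD_zero_mem ones (r, c) hne (by simpa using hDm)
      exact (hsrc _ hmem) hund
    · have hpos : 0 < pvD ones (r, c) := by
        rw [hDm]; exact_mod_cast Nat.pos_of_ne_zero hm0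
      obtain ⟨w, hadj, hw1, hw2, hwd⟩ := pvD_descent rows cols ones hne hb (r, c) hr hc hpos
      have hwdm : pvD ones w = ((m - 1 : Nat) : Int) := by
        rw [hwd, hDm]; omega
      by_cases hw : pvGet2 dist w.1 w.2 = -1
      · obtain ⟨u, rest, hq, hle⟩ := ih (m - 1) (by omega) w.1 w.2 hw1 hw2 hw hwdm
        exact ⟨u, rest, hq, by omega⟩
      · have hwval : pvGet2 dist w.1 w.2 = pvD ones w := hcor w.1 w.2 hw1 hw2 hw
        by_cases hwq : w ∈ queue
        · cases queue with
          | nil => simp at hwq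
          | cons u rest =>
            refine ⟨u, rest, rfl, ?_⟩
            have hmin : pvGet2 dist u.1 u.2 ≤ pvGet2 dist w.1 w.2 := by
              rcases List.mem_cons.mp hwq with h | h
              · exact le_of_eq (by rw [h])
              · exact (List.pairwise_cons.mp hpw).1 _ h
            rw [hwval, hwdm] at hmin
            omega
        · exfalso
          exact hproc w.1 w.2 hw1 hw2 hw hwq (r, c) (pvAdj_symm hadj) hr hc hund

-- ---- one BFS iteration preserves the invariant ----

-- the neighbour cell A computes for direction d
def pvNbr (u : Nat × Nat) (d : Int × Int) : Nat × Nat :=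
  (((u.1 : Int) + d.1).toNat, ((u.2 : Int) + d.2).toNat)

theorem pvAdj_nbr_of_dir (u : Nat × Nat) (d : Int × Int) (hd : d ∈ pvDirsA)
    (h1 : 0 ≤ (u.1 : Int) + d.1) (h2 : 0 ≤ (u.2 : Int) + d.2) :
    pvAdj (pvNbr u d) u := by
  obtain ⟨u1, u2⟩ := u
  simp only [pvDirsA, List.mem_cons, List.not_mem_nil, or_false] at hd
  rcases hd with rfl | rfl | rfl | rfl <;>
    simp only [pvNbr, pvAdj] at h1 h2 ⊢ <;> omega

theorem pvAdj_to_dir (u p : Nat × Nat) (hadj : pvAdj p u) :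
    ∃ d ∈ pvDirsA, p = pvNbr u d := by
  obtain ⟨u1, u2⟩ := u
  obtain ⟨p1, p2⟩ := p
  simp only [pvAdj] at hadj
  simp only [pvDirsA, List.mem_cons, List.not_mem_nil, or_false, pvNbr, Prod.mk.injEq]
  rcases hadj with ⟨h1, h2 | h2⟩ | ⟨h1, h2 | h2⟩
  · exact ⟨(0, 1), by tauto, by constructor <;> simp <;> omega⟩
  · exact ⟨(0, -1), by tauto, by constructor <;> simp <;> omega⟩
  · exact ⟨(1, 0), by tauto, by constructor <;> simp <;> omega⟩
  · exact ⟨(-1, 0), by tauto, by constructor <;> simp <;> omega⟩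

theorem pvNbr_bounds (rows cols : Nat) (u p : Nat × Nat) (d : Int × Int) (hd : d ∈ pvDirsA)
    (hadj : pvAdj p u) (hp : p = pvNbr u d) (hp1 : p.1 < rows) (hp2 : p.2 < cols)
    (hu1 : u.1 < rows) (hu2 : u.2 < cols) :
    0 ≤ (u.1 : Int) + d.1 ∧ (u.1 : Int) + d.1 < (rows : Int) ∧
      0 ≤ (u.2 : Int) + d.2 ∧ (u.2 : Int) + d.2 < (cols : Int) := by
  obtain ⟨u1, u2⟩ := u
  obtain ⟨p1, p2⟩ := p
  simp only [pvDirsA, List.mem_cons, List.not_mem_nil, or_false] at hd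
  simp only [Prod.mk.injEq, pvNbr] at hp
  simp only at hp1 hp2 hu1 hu2
  rcases hd with rfl | rfl | rfl | rfl <;>
    simp only [pvAdj] at hadj <;> simp only at hp <;> omega

-- state of the four-direction relaxation phase, relative to the pre-pop matrix dist0
def pvRel (rows cols : Nat) (dist0 : List (List Int)) (u : Nat × Nat) (k : Int)
    (st : List (List Int) × List (Nat × Nat)) : Prop :=
  pvShape st.1 rows cols ∧
  (∀ p ∈ st.2, p.1 < rows ∧ p.2 < cols ∧ pvAdj p u ∧ pvGet2 dist0 p.1 p.2 = -1 ∧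
    pvGet2 st.1 p.1 p.2 = k + 1) ∧
  (∀ r c, r < rows → c < cols → (r, c) ∉ st.2 → pvGet2 st.1 r c = pvGet2 dist0 r c)

theorem pvStepA_rel (rows cols : Nat) (dist0 : List (List Int)) (u : Nat × Nat) (k : Int)
    (st : List (List Int) × List (Nat × Nat)) (d : Int × Int)
    (hu1 : u.1 < rows) (hu2 : u.2 < cols) (hk : pvGet2 dist0 u.1 u.2 = k) (hk0 : 0 ≤ k)
    (hd : d ∈ pvDirsA) (hR : pvRel rows cols dist0 u k st) :
    pvRel rows cols dist0 u k (pvStepA rows cols u st d) ∧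
    (∀ p ∈ st.2, p ∈ (pvStepA rows cols u st d).2) ∧
    (∀ p : Nat × Nat, p.1 < rows → p.2 < cols → pvAdj p u → p = pvNbr u d →
      p ∈ (pvStepA rows cols u st d).2 ∨ pvGet2 dist0 p.1 p.2 ≠ -1) := by
  obtain ⟨hsh, hacc, hunch⟩ := hR
  have hunotacc : (u.1, u.2) ∉ st.2 := by
    intro hmem
    have := (hacc _ hmem).2.2.2.1
    simp only at this
    omega
  have hkuSt : pvGet2 st.1 u.1 u.2 = k := by
    rw [hunch u.1 u.2 hu1 hu2 hunotacc, hk]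
  unfold pvStepA
  split_ifs with hg
  · obtain ⟨g1, g2, g3, g4, g5, g6, g7, g8⟩ := hg
    have hn1 : ((u.1 : Int) + d.1).toNat < rows := by omega
    have hn2 : ((u.2 : Int) + d.2).toNat < cols := by omega
    have hadjn : pvAdj (((u.1 : Int) + d.1).toNat, ((u.2 : Int) + d.2).toNat) u :=
      pvAdj_nbr_of_dir u d hd g1 g3
    have hnotacc : ((((u.1 : Int) + d.1).toNat, ((u.2 : Int) + d.2).toNat) : Nat × Nat) ∉ st.2 := by
      intro hmem
      have := (hacc _ hmem).2.2.2.2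
      simp only at this
      omega
    have hdist0n : pvGet2 dist0 ((u.1 : Int) + d.1).toNat ((u.2 : Int) + d.2).toNat = -1 := by
      rw [← hunch _ _ hn1 hn2 hnotacc]
      exact g7
    refine ⟨⟨pvShape_set hsh hn1, ?_, ?_⟩, ?_, ?_⟩
    · intro p hp
      simp only [List.mem_append, List.mem_cons, List.not_mem_nil, or_false] at hp
      rcases hp with hp | rfl
      · obtain ⟨i1, i2, i3, i4, i5⟩ := hacc p hp
        have hpne : (p.1, p.2) ≠ ((((u.1 : Int) + d.1).toNat, ((u.2 : Int) + d.2).toNat) : Nat × Nat) := by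
          intro hh
          apply hnotacc
          rw [← hh]
          exact hp
        refine ⟨i1, i2, i3, i4, ?_⟩
        rw [pvGet2_set_ne hpne]
        exact i5
      · refine ⟨hn1, hn2, hadjn, hdist0n, ?_⟩
        rw [pvGet2_set_self hsh hn1 hn2, hkuSt]
    · intro r c hr hc hni
      simp only [List.mem_append, List.mem_cons, List.not_mem_nil, or_false, not_or] at hni
      rw [pvGet2_set_ne (by simpa using hni.2), hunch r c hr hc hni.1]
    · intro p hp
      simp only [List.mem_append]
      exact Or.inl hp
    · intro p _ _ _ hpn
      left
      simp only [List.mem_append, List.mem_cons]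
      right; left
      rw [hpn]
      rfl
  · refine ⟨⟨hsh, hacc, hunch⟩, fun p hp => hp, ?_⟩
    intro p hp1 hp2 hadj hpn
    by_cases hpd0 : pvGet2 dist0 p.1 p.2 = -1
    · by_cases hmem : p ∈ st.2
      · exact Or.inl hmem
      · exfalso
        apply hg
        obtain ⟨g1, g2, g3, g4⟩ := pvNbr_bounds rows cols u p d hd hadj hpn hp1 hp2 hu1 hu2
        have hstv : pvGet2 st.1 ((u.1 : Int) + d.1).toNat ((u.2 : Int) + d.2).toNat = -1 := by
          have hnm : ((p.1, p.2) : Nat × Nat) ∉ st.2 := hmem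
          have h := hunch p.1 p.2 hp1 hp2 hnm
          rw [hpd0] at h
          have hh : pvGet2 st.1 (pvNbr u d).1 (pvNbr u d).2 = -1 := by rw [← hpn]; exact h
          exact hh
        exact ⟨g1, g2, g3, g4, by rw [hsh.1]; omega, by rw [pvShape_row hsh (by omega)]; omega,
          hstv, by rw [hkuSt]; exact hk0⟩
    · exact Or.inr hpd0

theorem pvRel_foldl (rows cols : Nat) (dist0 : List (List Int)) (u : Nat × Nat) (k : Int)
    (hu1 : u.1 < rows) (hu2 : u.2 < cols) (hk : pvGet2 dist0 u.1 u.2 = k) (hk0 : 0 ≤ k)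
    (l : List (Int × Int)) (hl : ∀ d ∈ l, d ∈ pvDirsA)
    (st : List (List Int) × List (Nat × Nat)) (hst : pvRel rows cols dist0 u k st) :
    pvRel rows cols dist0 u k (l.foldl (pvStepA rows cols u) st) ∧
    (∀ p ∈ st.2, p ∈ (l.foldl (pvStepA rows cols u) st).2) ∧
    (∀ p : Nat × Nat, p.1 < rows → p.2 < cols → pvAdj p u → (∃ d ∈ l, p = pvNbr u d) →
      p ∈ (l.foldl (pvStepA rows cols u) st).2 ∨ pvGet2 dist0 p.1 p.2 ≠ -1) := by
  induction l generalizing st with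
  | nil =>
    refine ⟨hst, fun p hp => hp, ?_⟩
    rintro p _ _ _ ⟨d, hd, _⟩
    simp at hd
  | cons d l ihl =>
    have hd : d ∈ pvDirsA := hl d (List.mem_cons_self ..)
    obtain ⟨hR1, hmono1, hcov1⟩ :=
      pvStepA_rel rows cols dist0 u k st d hu1 hu2 hk hk0 hd hst
    obtain ⟨hR2, hmono2, hcov2⟩ := ihl (fun x hx => hl x (List.mem_cons_of_mem _ hx)) _ hR1
    simp only [List.foldl_cons]
    refine ⟨hR2, fun p hp => hmono2 _ (hmono1 _ hp), ?_⟩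
    rintro p hp1 hp2 hadj ⟨d', hd', hpd'⟩
    rcases List.mem_cons.mp hd' with rfl | hd'
    · rcases hcov1 p hp1 hp2 hadj hpd' with h | h
      · exact Or.inl (hmono2 _ h)
      · exact Or.inr h
    · exact hcov2 p hp1 hp2 hadj ⟨d', hd', hpd'⟩

theorem pvInv_step (rows cols : Nat) (ones : List (Nat × Nat)) (hne : ones ≠ [])
    (hb : ∀ q ∈ ones, q.1 < rows ∧ q.2 < cols) (dist : List (List Int)) (u : Nat × Nat)
    (rest : List (Nat × Nat)) (hinv : pvInv rows cols ones dist (u :: rest)) :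
    pvInv rows cols ones (pvRelaxA rows cols u (dist, [])).1
      (rest ++ (pvRelaxA rows cols u (dist, [])).2) := by
  have hinv' := hinv
  obtain ⟨hsh, hsrc, hcor, hqb, hpw, hhd, hproc⟩ := hinv
  obtain ⟨hu1, hu2, hune⟩ := hqb u (List.mem_cons_self ..)
  set k := pvGet2 dist u.1 u.2 with hkdef
  have hkD : k = pvD ones u := hcor u.1 u.2 hu1 hu2 hune
  have hk0 : 0 ≤ k := by rw [hkD]; exact pvD_nonneg ones u hne
  have h0 : pvRel rows cols dist u k (dist, []) :=
    ⟨hsh, by simp, fun r c _ _ _ => rfl⟩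
  obtain ⟨hRf, _, hcov⟩ := pvRel_foldl rows cols dist u k hu1 hu2 rfl hk0 pvDirsA
    (fun d hd => hd) (dist, []) h0
  set s := pvRelaxA rows cols u (dist, []) with hs
  have hsf : s = pvDirsA.foldl (pvStepA rows cols u) (dist, []) := rfl
  rw [hsf] at *
  obtain ⟨hshF, haccF, hunchF⟩ := hRf
  -- discovered cells keep their value and are not in the appended frontier
  have hkeep : ∀ r c, r < rows → c < cols → pvGet2 dist r c ≠ -1 →
      ((r, c) : Nat × Nat) ∉ (pvDirsA.foldl (pvStepA rows cols u) (dist, [])).2 ∧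
      pvGet2 (pvDirsA.foldl (pvStepA rows cols u) (dist, [])).1 r c = pvGet2 dist r c := by
    intro r c hr hc hdnz
    have hni : ((r, c) : Nat × Nat) ∉ (pvDirsA.foldl (pvStepA rows cols u) (dist, [])).2 :=
      fun hm => hdnz ((haccF _ hm).2.2.2.1)
    exact ⟨hni, hunchF r c hr hc hni⟩
  -- after the four steps every in-grid neighbour of u is discovered
  have hcovAll : ∀ p : Nat × Nat, p.1 < rows → p.2 < cols → pvAdj p u →
      pvGet2 (pvDirsA.foldl (pvStepA rows cols u) (dist, [])).1 p.1 p.2 ≠ -1 := by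
    intro p hp1 hp2 hadj
    obtain ⟨d, hd, hpd⟩ := pvAdj_to_dir u p hadj
    rcases hcov p hp1 hp2 hadj ⟨d, hd, hpd⟩ with h | h
    · rw [(haccF _ h).2.2.2.2]; omega
    · rw [(hkeep p.1 p.2 hp1 hp2 h).2]; exact h
  -- frontier cells carry the exact distance k+1
  have hvalAcc : ∀ p ∈ (pvDirsA.foldl (pvStepA rows cols u) (dist, [])).2,
      pvD ones p = k + 1 := by
    intro p hp
    obtain ⟨i1, i2, i3, i4, _⟩ := haccF p hp
    have hle : pvD ones p ≤ k + 1 := by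
      have := pvD_lipschitz ones p u hne i3
      omega
    have hge : k + 1 ≤ pvD ones p := by
      have hnn := pvD_nonneg ones p hne
      obtain ⟨u', rest', hq, hle'⟩ := pvUndisc rows cols ones hne hb dist (u :: rest) hinv'
        (pvD ones p).toNat p.1 p.2 i1 i2 i4 (by show pvD ones p = ((pvD ones p).toNat : Int); omega)
      have : u' = u := (List.cons.injEq _ _ _ _ ▸ hq).1.symm
      rw [this] at hle'
      omega
    omega
  refine ⟨hshF, ?_, ?_, ?_, ?_, ?_, ?_⟩
  · -- sources stay discovered
    intro p hp
    have hpb := hb p hp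
    rw [(hkeep p.1 p.2 hpb.1 hpb.2 (hsrc p hp)).2]
    exact hsrc p hp
  · -- correctness of every discovered value
    intro r c hr hc hdz
    by_cases hm : ((r, c) : Nat × Nat) ∈ (pvDirsA.foldl (pvStepA rows cols u) (dist, [])).2
    · rw [(haccF _ hm).2.2.2.2]
      exact (hvalAcc _ hm).symm
    · rw [hunchF r c hr hc hm] at hdz ⊢
      exact hcor r c hr hc hdz
  · -- queue bounds
    intro p hp
    rcases List.mem_append.mp hp with hp | hp
    · obtain ⟨j1, j2, j3⟩ := hqb p (List.mem_cons_of_mem _ hp)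
      refine ⟨j1, j2, ?_⟩
      rw [(hkeep p.1 p.2 j1 j2 j3).2]
      exact j3
    · obtain ⟨i1, i2, _, _, i5⟩ := haccF p hp
      exact ⟨i1, i2, by rw [i5]; omega⟩
  · -- the new queue is still sorted by value
    rw [List.pairwise_append]
    refine ⟨?_, ?_, ?_⟩
    · have hrest := (List.pairwise_cons.mp hpw).2
      refine hrest.imp_of_mem ?_
      intro a b ha hb' hab
      obtain ⟨j1, j2, j3⟩ := hqb a (List.mem_cons_of_mem _ ha)
      obtain ⟨j1', j2', j3'⟩ := hqb b (List.mem_cons_of_mem _ hb')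
      rw [(hkeep a.1 a.2 j1 j2 j3).2, (hkeep b.1 b.2 j1' j2' j3').2]
      exact hab
    · refine List.pairwise_iff_forall_sublist.mpr ?_
      intro a b hsub
      have ha := hsub.subset (List.mem_cons_self ..)
      have hb' := hsub.subset (List.mem_cons_of_mem _ (List.mem_cons_self ..))
      rw [(haccF _ ha).2.2.2.2, (haccF _ hb').2.2.2.2]
    · intro a ha b hb'
      obtain ⟨j1, j2, j3⟩ := hqb a (List.mem_cons_of_mem _ ha)
      rw [(hkeep a.1 a.2 j1 j2 j3).2, (haccF _ hb').2.2.2.2]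
      have := hhd u (by simp) a (List.mem_cons_of_mem _ ha)
      omega
  · -- head bound
    intro u' hu' p hp
    cases hrest : rest with
    | nil =>
      rw [hrest] at hu' hp
      simp only [List.nil_append] at hu' hp
      have hu'm : u' ∈ (pvDirsA.foldl (pvStepA rows cols u) (dist, [])).2 :=
        List.mem_of_mem_head? hu'
      rw [(haccF _ hu'm).2.2.2.2, (haccF _ hp).2.2.2.2]
      omega
    | cons h t =>
      rw [hrest] at hu' hp
      simp only [List.cons_append, List.head?_cons, Option.mem_some_iff] at hu'
      have e : u' = h := hu'.symm
      rw [e]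
      have hhrest : h ∈ rest := by rw [hrest]; exact List.mem_cons_self ..
      obtain ⟨j1, j2, j3⟩ := hqb h (List.mem_cons_of_mem _ hhrest)
      have hkh : k ≤ pvGet2 dist h.1 h.2 := (List.pairwise_cons.mp hpw).1 h hhrest
      rw [(hkeep h.1 h.2 j1 j2 j3).2]
      rcases List.mem_cons.mp hp with rfl | hp'
      · rw [(hkeep p.1 p.2 j1 j2 j3).2]
        omega
      · rcases List.mem_append.mp hp' with hp'' | hp''
        · have hprest : p ∈ rest := by rw [hrest]; exact List.mem_cons_of_mem _ hp''
          obtain ⟨l1, l2, l3⟩ := hqb p (List.mem_cons_of_mem _ hprest)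
          rw [(hkeep p.1 p.2 l1 l2 l3).2]
          have := hhd u (by simp) p (List.mem_cons_of_mem _ hprest)
          omega
        · rw [(haccF _ hp'').2.2.2.2]
          omega
  · -- processed cells have all neighbours discovered
    intro r c hr hc hdz hnq p hadj hp1 hp2
    have hnacc : ((r, c) : Nat × Nat) ∉ (pvDirsA.foldl (pvStepA rows cols u) (dist, [])).2 :=
      fun hm => hnq (List.mem_append.mpr (Or.inr hm))
    have hold : pvGet2 dist r c ≠ -1 := by
      rw [hunchF r c hr hc hnacc] at hdz
      exact hdz
    by_cases heq : ((r, c) : Nat × Nat) = u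
    · apply hcovAll p hp1 hp2
      rw [← heq]
      exact hadj
    · have hnold : ((r, c) : Nat × Nat) ∉ u :: rest := by
        intro hm
        rcases List.mem_cons.mp hm with hm | hm
        · exact heq hm
        · exact hnq (List.mem_append.mpr (Or.inl hm))
      have := hproc r c hr hc hold hnold p hadj hp1 hp2
      rw [(hkeep p.1 p.2 hp1 hp2 this).2]
      exact this

theorem pvInv_final (rows cols : Nat) (ones : List (Nat × Nat)) (hne : ones ≠ [])
    (hb : ∀ q ∈ ones, q.1 < rows ∧ q.2 < cols) (dist : List (List Int))
    (hinv : pvInv rows cols ones dist []) :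
    ∀ r c, r < rows → c < cols → pvGet2 dist r c = pvD ones (r, c) := by
  intro r c hr hc
  by_cases h : pvGet2 dist r c = -1
  · exfalso
    have hnn := pvD_nonneg ones (r, c) hne
    obtain ⟨u, rest, habs, _⟩ := pvUndisc rows cols ones hne hb dist [] hinv
      (pvD ones (r, c)).toNat r c hr hc h (by omega)
    simp at habs
  · exact hinv.2.2.1 r c hr hc h

theorem pvBfs_of_inv (rows cols : Nat) (ones : List (Nat × Nat)) (hne : ones ≠ [])
    (hb : ∀ q ∈ ones, q.1 < rows ∧ q.2 < cols) (dist : List (List Int))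
    (queue : List (Nat × Nat)) (hinv : pvInv rows cols ones dist queue) :
    pvShape (pvBfsA rows cols dist queue) rows cols ∧
    ∀ r c, r < rows → c < cols →
      pvGet2 (pvBfsA rows cols dist queue) r c = pvD ones (r, c) := by
  revert hinv
  induction dist, queue using pvBfsA.induct rows cols with
  | case1 dist =>
    intro hinv
    rw [pvBfsA]
    exact ⟨hinv.1, pvInv_final rows cols ones hne hb dist hinv⟩
  | case2 dist rc rest st ih =>
    intro hinv
    rw [pvBfsA]
    exact ih (pvInv_step rows cols ones hne hb dist rc rest hinv)

-- the source list both programs build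
theorem pvOnes_mem (grid : List (List Int)) (rows cols : Nat) (p : Nat × Nat) :
    p ∈ (List.range rows).flatMap (fun r =>
        ((List.range cols).filter (fun c => pvGetG grid r c = 1)).map (fun c => (r, c))) ↔
      p.1 < rows ∧ p.2 < cols ∧ pvGetG grid p.1 p.2 = 1 := by
  obtain ⟨p1, p2⟩ := p
  simp [List.mem_flatMap, List.mem_map, List.mem_filter, List.mem_range]

-- initial state satisfies the invariant
theorem pvInv_init (grid : List (List Int)) (rows cols : Nat)
    (ones : List (Nat × Nat))
    (hones : ones = (List.range rows).flatMap (fun r =>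
      ((List.range cols).filter (fun c => pvGetG grid r c = 1)).map (fun c => (r, c)))) :
    pvInv rows cols ones
      ((List.range rows).map (fun r =>
        (List.range cols).map (fun c => if pvGetG grid r c = 1 then 0 else -1)))
      ones := by
  set M := (List.range rows).map (fun r =>
    (List.range cols).map (fun c => if pvGetG grid r c = 1 then 0 else -1)) with hM
  have hmem : ∀ p : Nat × Nat, p ∈ ones ↔ p.1 < rows ∧ p.2 < cols ∧ pvGetG grid p.1 p.2 = 1 := by
    intro p; rw [hones]; exact pvOnes_mem grid rows cols p
  have hget : ∀ r c, r < rows → c < cols →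
      pvGet2 M r c = if pvGetG grid r c = 1 then 0 else -1 := by
    intro r c hr hc; exact pvGet2_mk rows cols _ r c hr hc
  have hzero : ∀ p ∈ ones, pvGet2 M p.1 p.2 = 0 := by
    intro p hp
    obtain ⟨h1, h2, h3⟩ := (hmem p).mp hp
    rw [hget p.1 p.2 h1 h2, if_pos h3]
  refine ⟨pvShape_mk rows cols _, ?_, ?_, ?_, ?_, ?_, ?_⟩
  · intro p hp; rw [hzero p hp]; omega
  · intro r c hr hc hd
    have := hget r c hr hc
    by_cases hg : pvGetG grid r c = 1
    · rw [this, if_pos hg]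
      exact (pvD_mem_zero ones (r, c) ((hmem (r, c)).mpr ⟨hr, hc, hg⟩)).symm
    · rw [this, if_neg hg] at hd; simp at hd
  · intro p hp
    obtain ⟨h1, h2, _⟩ := (hmem p).mp hp
    exact ⟨h1, h2, by rw [hzero p hp]; omega⟩
  · exact List.pairwise_iff_forall_sublist.mpr (by
      intro a b hsub
      have ha := hsub.subset (List.mem_cons_self ..)
      have hb := hsub.subset (List.mem_cons_of_mem _ (List.mem_cons_self ..))
      rw [hzero a ha, hzero b hb])
  · intro u hu p hp
    have hu' : u ∈ ones := by
      cases hq : ones with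
      | nil => rw [hq] at hu; simp at hu
      | cons x xs => rw [hq] at hu; simp at hu; rw [← hu]; exact List.mem_cons_self ..
    rw [hzero u hu', hzero p hp]; omega
  · intro r c hr hc hd hnq
    exfalso
    apply hnq
    have := hget r c hr hc
    by_cases hg : pvGetG grid r c = 1
    · exact (hmem (r, c)).mpr ⟨hr, hc, hg⟩
    · rw [this, if_neg hg] at hd; simp at hd

-- ===== initialisation: A's step-1 double fold equals the comprehension matrices =====

def pvRowStep (grid : List (List Int)) (r : Nat) (row : List Int) (c : Nat) : List Int :=
  if pvGetG grid r c = 1 then row.set c 0 else row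

def pvRowT (grid : List (List Int)) (r : Nat) (l : List Nat) (row : List Int) : List Int :=
  l.foldl (pvRowStep grid r) row

theorem pvRowT_getElem? (grid : List (List Int)) (r : Nat) (l : List Nat) (row : List Int)
    (hb : ∀ c ∈ l, c < row.length) (c' : Nat) :
    (pvRowT grid r l row)[c']? =
      if c' ∈ l ∧ pvGetG grid r c' = 1 then some 0 else row[c']? := by
  induction l generalizing row with
  | nil => simp [pvRowT]
  | cons c l ih =>
    unfold pvRowT at *
    simp only [List.foldl_cons]
    have hb' : ∀ x ∈ l, x < (pvRowStep grid r row c).length := by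
      intro x hx
      unfold pvRowStep
      split_ifs <;> simp [hb x (List.mem_cons_of_mem _ hx)]
    rw [ih _ hb']
    unfold pvRowStep
    by_cases hmem : c' ∈ l ∧ pvGetG grid r c' = 1
    · simp [hmem, List.mem_cons_of_mem _ hmem.1]
    · rw [if_neg hmem]
      by_cases hcc : c' = c
      · subst hcc
        by_cases hg : pvGetG grid r c' = 1
        · simp [hg, List.getElem?_set_self (hb c' (List.mem_cons_self ..))]
        · simp [hg]
      · have hout : ¬ (c' ∈ c :: l ∧ pvGetG grid r c' = 1) := by
          intro ⟨h1, h2⟩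
          rcases List.mem_cons.mp h1 with h | h
          · exact hcc h
          · exact hmem ⟨h, h2⟩
        rw [if_neg hout]
        split_ifs with hg
        · exact List.getElem?_set_ne (fun h => hcc h.symm)
        · rfl

theorem pvRowT_replicate (grid : List (List Int)) (r m : Nat) :
    pvRowT grid r (List.range m) (List.replicate m (-1)) =
      (List.range m).map (fun c => if pvGetG grid r c = 1 then 0 else -1) := by
  apply List.ext_getElem?
  intro c'
  rw [pvRowT_getElem? grid r _ _ (by simp [List.mem_range]) c']
  by_cases hc : c' < m
  · rw [List.getElem?_map, List.getElem?_range hc]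
    simp [List.mem_range, hc]
    split_ifs <;> simp
  · have h1 : c' ∉ List.range m := by simp [List.mem_range]; omega
    simp only [h1, false_and, if_false]
    rw [List.getElem?_eq_none (by simpa using Nat.le_of_not_lt hc),
        List.getElem?_eq_none (by simpa using Nat.le_of_not_lt hc)]

-- the inner (over c) fold of A's step 1, as a single-row transformation
theorem pvInner_eq (grid : List (List Int)) (r : Nat) (l : List Nat)
    (dist : List (List Int)) (q : List (Nat × Nat)) (hr : r < dist.length) :
    l.foldl (pvInStep grid r) (dist, q) =
      (dist.set r (pvRowT grid r l (pvRow dist r)),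
        q ++ (l.filter (fun c => pvGetG grid r c = 1)).map (fun c => (r, c))) := by
  induction l generalizing dist q with
  | nil =>
    simp only [List.foldl_nil, pvRowT, List.filter_nil, List.map_nil, List.append_nil]
    rw [pvRow, List.getD_eq_getElem _ _ hr, List.set_getElem_self]
  | cons c l ih =>
    simp only [List.foldl_cons]
    by_cases hg : pvGetG grid r c = 1
    · rw [show pvInStep grid r (dist, q) c = (pvSet2 dist r c 0, q ++ [(r, c)]) from by
        simp [pvInStep, hg]]
      have hr' : r < (pvSet2 dist r c 0).length := by simp [pvSet2, hr]
      rw [ih _ _ hr']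
      have hrow : pvRow (pvSet2 dist r c 0) r = (pvRow dist r).set c 0 := by
        simp [pvSet2, pvRow, List.getD_eq_getElem?_getD,
          List.getElem?_set_self (show r < (dist : List (List Int)).length from hr)]
      rw [hrow]
      simp only [pvSet2, List.set_set]
      simp [pvRowT, pvRowStep, hg]
    · rw [show pvInStep grid r (dist, q) c = (dist, q) from by simp [pvInStep, hg],
        ih _ _ hr]
      simp [pvRowT, pvRowStep, hg]

-- the whole-dist row update of A's step 1
def pvDUpd (grid : List (List Int)) (m : Nat) (dd : List (List Int)) (r : Nat) :
    List (List Int) :=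
  dd.set r (pvRowT grid r (List.range m) (pvRow dd r))

theorem pvOuter_eq (grid : List (List Int)) (m : Nat) (l : List Nat)
    (dist : List (List Int)) (q : List (Nat × Nat)) (hb : ∀ r ∈ l, r < dist.length) :
    l.foldl (fun st r => (List.range m).foldl (pvInStep grid r) st) (dist, q) =
      (l.foldl (pvDUpd grid m) dist,
        q ++ l.flatMap (fun r =>
          ((List.range m).filter (fun c => pvGetG grid r c = 1)).map (fun c => (r, c)))) := by
  induction l generalizing dist q with
  | nil => simp
  | cons r l ih =>
    simp only [List.foldl_cons]
    rw [pvInner_eq grid r _ dist q (hb r (List.mem_cons_self ..))]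
    rw [ih _ _ (by intro x hx; simpa using hb x (List.mem_cons_of_mem _ hx))]
    simp [pvDUpd, List.flatMap_cons, List.append_assoc]

theorem pvDFold_getElem? (grid : List (List Int)) (m : Nat) (l : List Nat)
    (dd : List (List Int)) (hnd : l.Nodup) (hb : ∀ r ∈ l, r < dd.length) (r' : Nat) :
    (l.foldl (pvDUpd grid m) dd)[r']? =
      if r' ∈ l then some (pvRowT grid r' (List.range m) (pvRow dd r')) else dd[r']? := by
  induction l generalizing dd with
  | nil => simp
  | cons r l ih =>
    simp only [List.foldl_cons]
    have hnd' := (List.nodup_cons.mp hnd).2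
    have hnotmem := (List.nodup_cons.mp hnd).1
    have hrlen := hb r (List.mem_cons_self ..)
    rw [ih _ hnd' (by intro x hx; simpa [pvDUpd] using hb x (List.mem_cons_of_mem _ hx))]
    by_cases hm : r' ∈ l
    · have hne : r' ≠ r := fun h => hnotmem (h ▸ hm)
      have hrow : pvRow (pvDUpd grid m dd r) r' = pvRow dd r' := by
        simp [pvDUpd, pvRow, List.getD_eq_getElem?_getD, List.getElem?_set_ne (fun h => hne h.symm)]
      simp [hm, hrow, List.mem_cons]
    · rw [if_neg hm]
      by_cases hrr : r' = r
      · subst hrr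
        simp [pvDUpd, List.getElem?_set_self hrlen, List.mem_cons]
      · have hni : r' ∉ r :: l := by
          simp only [List.mem_cons]
          tauto
        rw [if_neg hni]
        simp [pvDUpd, List.getElem?_set_ne (fun h => hrr h.symm)]

theorem pvInit_eq (grid : List (List Int)) :
    ((List.range grid.length).foldl
        (fun st r => (List.range (grid.getD 0 []).length).foldl (pvInStep grid r) st)
        ((List.range grid.length).map (fun _ => List.replicate (grid.getD 0 []).length (-1)), [])) =
      ((List.range grid.length).map (fun r =>
          (List.range (grid.getD 0 []).length).map (fun c => if pvGetG grid r c = 1 then 0 else -1)),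
        (List.range grid.length).flatMap (fun r =>
          ((List.range (grid.getD 0 []).length).filter (fun c => pvGetG grid r c = 1)).map
            (fun c => (r, c)))) := by
  set n := grid.length
  set m := (grid.getD 0 []).length
  set R0 : List (List Int) := (List.range n).map (fun _ => List.replicate m (-1)) with hR0
  rw [pvOuter_eq grid m _ R0 [] (by intro r hr; simp [hR0, List.mem_range.mp hr])]
  refine Prod.ext ?_ (by simp)
  simp only
  apply List.ext_getElem?
  intro r'
  rw [pvDFold_getElem? grid m _ R0 (List.nodup_range) (by intro r hr; simp [hR0, List.mem_range.mp hr]) r']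
  by_cases hr : r' < n
  · have hrowR0 : pvRow R0 r' = List.replicate m (-1) := by
      simp [hR0, pvRow, List.getD_eq_getElem?_getD, hr]
    rw [if_pos (List.mem_range.mpr hr), hrowR0, pvRowT_replicate]
    rw [List.getElem?_map, List.getElem?_range hr]
    rfl
  · rw [if_neg (by simp [List.mem_range]; omega)]
    rw [List.getElem?_eq_none (by simp [hR0]; omega),
        List.getElem?_eq_none (by simp; omega)]

-- ===== VERDICT (by name: the statement is the Claim_ definition above) =====
theorem nearest_cell_spec : Claim_equal_nearest_cell := by
  intro grid _ _
  unfold Spec_nearest_cell nearest_cell nearest_cell_alt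
  simp only
  rw [pvInit_eq grid]
  set rows := grid.length with hrows
  set cols := (grid.getD 0 []).length with hcols
  set ones := (List.range rows).flatMap (fun r =>
    ((List.range cols).filter (fun c => pvGetG grid r c = 1)).map (fun c => (r, c))) with hON
  have hB : ∀ r c : Nat,
      pvMinD (ones.map (fun p => |(r : Int) - p.1| + |(c : Int) - p.2|)) (-1) =
        pvD ones (r, c) := fun r c => rfl
  have hbnd : ∀ q ∈ ones, q.1 < rows ∧ q.2 < cols := by
    intro q hq
    rw [hON, pvOnes_mem] at hq
    exact ⟨hq.1, hq.2.1⟩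
  by_cases hne : ones = []
  · rw [hne]
    rw [pvBfsA]
    apply pvMatrix_ext
    · exact pvShape_mk rows cols _
    · intro r c hr hc
      rw [pvGet2_mk rows cols _ r c hr hc]
      have hno : pvGetG grid r c ≠ 1 := by
        intro hg
        have : ((r, c) : Nat × Nat) ∈ ones := by
          rw [hON, pvOnes_mem]; exact ⟨hr, hc, hg⟩
        rw [hne] at this; simp at this
      simp [hno, pvMinD]
  · obtain ⟨hsh, hval⟩ := pvBfs_of_inv rows cols ones hne hbnd _ ones
      (pvInv_init grid rows cols ones hON)
    apply pvMatrix_ext _ _ _ _ hsh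
    intro r c hr hc
    rw [hval r c hr hc]
    exact (hB r c).symm
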